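-- pv_equiv track=rewrite | github.com/kisblilla/interview | secondtask.py | vertical_up
-- ===== SOURCE A (Python) =====
-- def compare(arr, obstacles):
--     for k in range(len(obstacles)):
--         obstac=(obstacles[k][0], obstacles[k][1])
--         comparison=arr==obstac
--         if comparison==True:
--             return True
--
-- def vertical_up(n, rq, cq, obstacles, counter):
--
--     i=1
--     while (rq-i)>0:
--         arr=(rq-i,cq)
--         if compare(arr,obstacles)==True:
--                 return counter
--         counter= counter +1
--         i=i+1
--     return (counter)
-- ===== SOURCE B (Python) =====
-- def vertical_up(n, rq, cq, obstacles, counter):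
--     rows = [r for r, c in obstacles if c == cq and 1 <= r < rq]
--     steps = rq - max(rows) - 1 if rows else max(0, rq - 1)
--     return counter + steps
-- ===== Notes on version B (the rewrite author's own statement) =====
-- stated objective: faster
-- what changed: Replaces the cell-by-cell while-loop (each step scanning all obstacles) by one scan of obstacles collecting rows in column cq below rq, then computing the step count arithmetically from the maximum such row.
import Mathlib
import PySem

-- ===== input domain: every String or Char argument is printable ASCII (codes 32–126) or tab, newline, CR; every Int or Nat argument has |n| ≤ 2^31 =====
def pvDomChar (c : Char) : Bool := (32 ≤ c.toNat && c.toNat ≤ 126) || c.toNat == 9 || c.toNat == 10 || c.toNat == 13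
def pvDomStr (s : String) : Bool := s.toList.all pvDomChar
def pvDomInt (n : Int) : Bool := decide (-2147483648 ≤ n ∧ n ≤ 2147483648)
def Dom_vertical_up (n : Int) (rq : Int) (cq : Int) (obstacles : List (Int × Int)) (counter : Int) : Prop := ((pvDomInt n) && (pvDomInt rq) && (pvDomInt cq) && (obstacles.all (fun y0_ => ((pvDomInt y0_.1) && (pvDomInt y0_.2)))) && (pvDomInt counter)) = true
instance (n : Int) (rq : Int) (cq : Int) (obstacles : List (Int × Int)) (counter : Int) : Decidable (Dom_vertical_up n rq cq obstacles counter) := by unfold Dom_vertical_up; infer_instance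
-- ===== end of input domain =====

-- B replaces A's cell-by-cell while-loop by one scan of the obstacle list plus arithmetic on the
-- maximum obstacle row below the start (objective: faster, one pass over obstacles).
-- ===== PORT A =====
-- `compare` returns True on a match and falls off the end otherwise (Python: None) → Option Bool
def compareA (arr : Int × Int) : List (Int × Int) → Option Bool
  | [] => none
  | o :: rest => if arr = (o.1, o.2) then some true else compareA arr rest

def vloopA (rq : Int) (cq : Int) (obstacles : List (Int × Int)) (counter : Int) (i : Int) : Int :=
  if h : rq - i > 0 then
    if compareA (rq - i, cq) obstacles == some true then counter
    else vloopA rq cq obstacles (counter + 1) (i + 1)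
  else counter
termination_by (rq - i).toNat
decreasing_by omega

def vertical_up (n : Int) (rq : Int) (cq : Int) (obstacles : List (Int × Int)) (counter : Int) : Int :=
  vloopA rq cq obstacles counter 1

-- ===== PORT B =====
def vertical_up_alt (n : Int) (rq : Int) (cq : Int) (obstacles : List (Int × Int)) (counter : Int) : Int :=
  let rows := (obstacles.filter (fun p => decide (p.2 = cq ∧ 1 ≤ p.1 ∧ p.1 < rq))).map Prod.fst
  let steps := match rows.max? with
    | some m => rq - m - 1
    | none => max 0 (rq - 1)
  counter + steps

-- ===== PRECONDITION & SPEC =====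
def Spec_vertical_up (n : Int) (rq : Int) (cq : Int) (obstacles : List (Int × Int)) (counter : Int) (out : Int) : Prop := out = vertical_up_alt n rq cq obstacles counter
instance (n : Int) (rq : Int) (cq : Int) (obstacles : List (Int × Int)) (counter : Int) (out : Int) : Decidable (Spec_vertical_up n rq cq obstacles counter out) := by unfold Spec_vertical_up; infer_instance

-- ===== CLAIM (what is proved, stated in full; the proofs are below) =====
def Claim_equal_vertical_up : Prop := ∀ (n : Int) (rq : Int) (cq : Int) (obstacles : List (Int × Int)) (counter : Int), Dom_vertical_up n rq cq obstacles counter → Spec_vertical_up n rq cq obstacles counter (vertical_up n rq cq obstacles counter)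

-- ===== LEMMAS AND PROOFS =====

-- ===== VERDICT (by name: the statement is the Claim_ definition above) =====
-- rows of obstacles in column cq with 1 ≤ r ≤ b
def rowsUpTo (cq : Int) (obstacles : List (Int × Int)) (b : Int) : List Int :=
  (obstacles.filter (fun p => decide (p.2 = cq ∧ 1 ≤ p.1 ∧ p.1 ≤ b))).map Prod.fst

theorem compareA_some_true (arr : Int × Int) (l : List (Int × Int)) :
    compareA arr l = some true ↔ arr ∈ l := by
  induction l with
  | nil => simp [compareA]
  | cons o rest ih =>
    simp only [compareA, List.mem_cons]
    by_cases h : arr = (o.1, o.2) <;> simp [h, ih]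

theorem mem_rowsUpTo (cq : Int) (obstacles : List (Int × Int)) (b r : Int) :
    r ∈ rowsUpTo cq obstacles b ↔ (r, cq) ∈ obstacles ∧ 1 ≤ r ∧ r ≤ b := by
  simp only [rowsUpTo, List.mem_map, List.mem_filter]
  constructor
  · rintro ⟨⟨pr, pc⟩, ⟨hm, hf⟩, rfl⟩
    simp at hf; obtain ⟨h1, h2, h3⟩ := hf; subst h1; exact ⟨hm, h2, h3⟩
  · rintro ⟨hm, h1, h2⟩
    exact ⟨(r, cq), ⟨hm, by simp [h1, h2]⟩, rfl⟩

theorem rowsUpTo_step (cq : Int) (obstacles : List (Int × Int)) (b : Int)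
    (hb : (b, cq) ∉ obstacles) : rowsUpTo cq obstacles b = rowsUpTo cq obstacles (b - 1) := by
  unfold rowsUpTo
  congr 1
  apply List.filter_congr
  intro p hp
  simp only [decide_eq_decide]
  constructor
  · rintro ⟨h1, h2, h3⟩
    refine ⟨h1, h2, ?_⟩
    rcases lt_or_eq_of_le h3 with h | h
    · omega
    · exfalso; apply hb
      have : p = (b, cq) := by
        obtain ⟨p1, p2⟩ := p
        simp at h1 h ⊢
        exact ⟨h, h1⟩
      rwa [this] at hp
  · rintro ⟨h1, h2, h3⟩; exact ⟨h1, h2, by omega⟩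

theorem vloopA_closed (rq cq : Int) (obstacles : List (Int × Int)) :
    ∀ (i counter : Int),
      vloopA rq cq obstacles counter i =
        counter + (match (rowsUpTo cq obstacles (rq - i)).max? with
          | some m => (rq - i) - m
          | none => max 0 (rq - i)) := by
  intro i counter
  generalize hk : (rq - i).toNat = k
  induction k generalizing i counter with
  | zero =>
    have h0 : ¬ rq - i > 0 := by omega
    rw [vloopA, dif_neg h0]
    have : rowsUpTo cq obstacles (rq - i) = [] := by
      rw [List.eq_nil_iff_forall_not_mem]
      intro r hr
      rw [mem_rowsUpTo] at hr
      omega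
    rw [this]
    simp
    omega
  | succ k ih =>
    have hpos : rq - i > 0 := by omega
    rw [vloopA, dif_pos hpos]
    by_cases hobs : (rq - i, cq) ∈ obstacles
    · rw [if_pos (by simpa [compareA_some_true])]
      have hmax : (rowsUpTo cq obstacles (rq - i)).max? = some (rq - i) := by
        rw [List.max?_eq_some_iff]
        constructor
        · rw [mem_rowsUpTo]; exact ⟨hobs, by omega, le_refl _⟩
        · intro x hx; rw [mem_rowsUpTo] at hx; omega
      rw [hmax]; simp
    · rw [if_neg (by simpa [compareA_some_true])]
      rw [ih (i + 1) (counter + 1) (by omega)]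
      have hrw : rq - (i + 1) = (rq - i) - 1 := by ring
      rw [hrw, ← rowsUpTo_step cq obstacles (rq - i) hobs]
      rcases hm : (rowsUpTo cq obstacles (rq - i)).max? with _ | m
      · dsimp only
        rw [max_eq_right (by omega : (0:Int) ≤ rq - i - 1),
            max_eq_right (by omega : (0:Int) ≤ rq - i)]
        ring
      · dsimp only
        ring

theorem filter_lt_eq_le (rq cq : Int) (obstacles : List (Int × Int)) :
    (obstacles.filter (fun p => decide (p.2 = cq ∧ 1 ≤ p.1 ∧ p.1 < rq))).map Prod.fst =
      rowsUpTo cq obstacles (rq - 1) := by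
  unfold rowsUpTo
  congr 1
  apply List.filter_congr
  intro p _
  simp only [decide_eq_decide]
  omega

theorem vertical_up_spec : Claim_equal_vertical_up := by
  intro n rq cq obstacles counter _
  unfold Spec_vertical_up vertical_up vertical_up_alt
  rw [vloopA_closed rq cq obstacles 1 counter, filter_lt_eq_le]
  dsimp only
  rcases hm : (rowsUpTo cq obstacles (rq - 1)).max? with _ | m
  · rfl
  · dsimp only
    ring
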